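-- pv_equiv track=rewrite | github.com/ChenyuGAO-CS/Variation-Transformer | workspace/emopia.py | obtain_theme_var_tokens_per_bar
-- ===== SOURCE A (Python) =====
-- def obtain_theme_var_tokens_per_bar(x):
--     bar_array = []
--     cnt_tokens = 0
--     for i in range (len(x)):
--         if x[i] == 520:
--             # '520' is the seperate token.
--             cnt_tokens = 0
--             bar_array.append(-1)
--         elif x[i] == 440:
--             # ‘440’ is the bar token, which appears at the begining of a new bar.
--             bar_array.append(cnt_tokens)
--             cnt_tokens = 0
--         elif x[i] == 442:
--             # '442' is the pad token.
--             continue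
--         cnt_tokens = cnt_tokens + 1
--     return bar_array
-- ===== SOURCE B (Python) =====
-- def obtain_theme_var_tokens_per_bar(x):
--     # Prefix sums of non-pad (!= 442) tokens: pre[i] = count in x[:i].
--     pre = [0]
--     for t in x:
--         pre.append(pre[-1] + (1 if t != 442 else 0))
--     out = []
--     prev = 0
--     for i, t in enumerate(x):
--         if t == 520:
--             out.append(-1)
--             prev = i
--         elif t == 440:
--             out.append(pre[i] - pre[prev])
--             prev = i
--     return out
-- ===== Notes on version B (the rewrite author's own statement) =====
-- stated objective: alternative
-- what changed: Replaces A's single loop with a running per-bar token counter by a prefix-sum array of non-pad tokens plus one pass over enumerate(x) that emits, at each marker, the constant-time count difference since the previous marker index.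
import Mathlib
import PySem

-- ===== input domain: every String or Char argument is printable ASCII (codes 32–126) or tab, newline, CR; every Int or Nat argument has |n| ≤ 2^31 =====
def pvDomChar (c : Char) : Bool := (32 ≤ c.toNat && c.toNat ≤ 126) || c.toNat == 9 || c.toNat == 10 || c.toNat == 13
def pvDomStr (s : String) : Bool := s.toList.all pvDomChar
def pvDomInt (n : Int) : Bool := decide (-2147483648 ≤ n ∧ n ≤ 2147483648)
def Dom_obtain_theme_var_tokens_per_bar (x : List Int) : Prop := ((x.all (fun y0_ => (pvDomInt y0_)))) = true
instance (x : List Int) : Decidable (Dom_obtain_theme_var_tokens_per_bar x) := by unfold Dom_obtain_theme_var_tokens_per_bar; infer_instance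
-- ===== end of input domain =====

-- B replaces A's running token counter by a prefix-sum array of non-pad tokens plus one pass
-- over the marker positions (objective: alternative decomposition, same cost).

-- ===== PORT A =====
-- literal port of A: one loop over x, state = (bar_array, cnt_tokens); 'continue' skips the
-- trailing 'cnt_tokens += 1', which otherwise runs after each branch (hence '0 + 1').
def pvAStep (s : List Int × Int) (t : Int) : List Int × Int :=
  if t = 520 then (s.1 ++ [-1], 0 + 1)
  else if t = 440 then (s.1 ++ [s.2], 0 + 1)
  else if t = 442 then s
  else (s.1, s.2 + 1)

def obtain_theme_var_tokens_per_bar (x : List Int) : List Int :=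
  (x.foldl pvAStep ([], 0)).1

-- ===== PORT B =====
-- first loop of B: pre.append(pre[-1] + (1 if t != 442 else 0))
def pvPreStep (acc : List Int) (t : Int) : List Int :=
  acc ++ [PySem.List.pyGetD acc (-1) 0 + (if t ≠ 442 then 1 else 0)]

def pvPre (x : List Int) : List Int := x.foldl pvPreStep [0]

-- body of B's second loop over enumerate(x); state s = (out, prev)
def pvBStep (pre : List Int) (s : List Int × Int) : Int × Int → List Int × Int
  | (i, t) =>
    if t = 520 then (s.1 ++ [-1], i)
    else if t = 440 then
      (s.1 ++ [PySem.List.pyGetD pre i 0 - PySem.List.pyGetD pre s.2 0], i)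
    else s

def obtain_theme_var_tokens_per_bar_alt (x : List Int) : List Int :=
  ((PySem.List.enumerate x 0).foldl (pvBStep (pvPre x)) ([], 0)).1

-- ===== PRECONDITION & SPEC =====
def Spec_obtain_theme_var_tokens_per_bar (x : List Int) (out : List Int) : Prop := out = obtain_theme_var_tokens_per_bar_alt x
instance (x : List Int) (out : List Int) : Decidable (Spec_obtain_theme_var_tokens_per_bar x out) := by unfold Spec_obtain_theme_var_tokens_per_bar; infer_instance

-- ===== CLAIM (what is proved, stated in full; the proofs are below) =====
def Claim_equal_obtain_theme_var_tokens_per_bar : Prop := ∀ (x : List Int), Dom_obtain_theme_var_tokens_per_bar x → Spec_obtain_theme_var_tokens_per_bar x (obtain_theme_var_tokens_per_bar x)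

-- ===== LEMMAS AND PROOFS =====

-- common reference form: structural recursion with the running counter
def pvRef : List Int → Int → List Int
  | [], _ => []
  | t :: xs, c =>
    if t = 520 then -1 :: pvRef xs 1
    else if t = 440 then c :: pvRef xs 1
    else if t = 442 then pvRef xs c
    else pvRef xs (c + 1)

-- number of non-pad tokens in l
def pvCnt (l : List Int) : Int := (l.countP (fun t => decide (t ≠ 442)) : Nat)

lemma pvCnt_cons (t : Int) (l : List Int) :
    pvCnt (t :: l) = (if t ≠ 442 then 1 else 0) + pvCnt l := by
  by_cases h : t = 442 <;> simp [pvCnt, List.countP_cons, h] <;> push_cast <;> ring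

lemma pvCnt_append_singleton (l : List Int) (t : Int) :
    pvCnt (l ++ [t]) = pvCnt l + (if t ≠ 442 then 1 else 0) := by
  by_cases h : t = 442 <;> simp [pvCnt, List.countP_append, List.countP_cons, h]

lemma pvA_fold (xs : List Int) : ∀ (acc : List Int) (c : Int),
    (xs.foldl pvAStep (acc, c)).1 = acc ++ pvRef xs c := by
  induction xs with
  | nil => intro acc c; simp [pvRef]
  | cons t xs ih =>
    intro acc c
    by_cases h1 : t = 520
    · have hstep : pvAStep (acc, c) t = (acc ++ [-1], 0 + 1) := by
        simp only [pvAStep]; rw [if_pos h1]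
      rw [List.foldl_cons, hstep, ih]
      simp [pvRef, h1]
    · by_cases h2 : t = 440
      · have hstep : pvAStep (acc, c) t = (acc ++ [c], 0 + 1) := by
          simp only [pvAStep]; rw [if_neg h1, if_pos h2]
        rw [List.foldl_cons, hstep, ih]
        simp [pvRef, h1, h2]
      · by_cases h3 : t = 442
        · have hstep : pvAStep (acc, c) t = (acc, c) := by
            simp only [pvAStep]; rw [if_neg h1, if_neg h2, if_pos h3]
          rw [List.foldl_cons, hstep, ih]
          simp [pvRef, h1, h2, h3]
        · have hstep : pvAStep (acc, c) t = (acc, c + 1) := by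
            simp only [pvAStep]; rw [if_neg h1, if_neg h2, if_neg h3]
          rw [List.foldl_cons, hstep, ih]
          simp [pvRef, h1, h2, h3]

lemma pvPre_fold (xs : List Int) : ∀ (acc : List Int) (a : Int),
    xs.foldl pvPreStep (acc ++ [a]) =
      acc ++ [a] ++ (List.range xs.length).map (fun i => a + pvCnt (xs.take (i + 1))) := by
  induction xs with
  | nil => intro acc a; simp
  | cons t xs ih =>
    intro acc a
    have hstep : pvPreStep (acc ++ [a]) t = (acc ++ [a]) ++ [a + (if t ≠ 442 then 1 else 0)] := by
      unfold pvPreStep; rw [PySem.List.pyGetD_neg_one_append_singleton]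
    rw [List.foldl_cons, hstep, ih]
    have hmap : (List.range (xs.length + 1)).map (fun i => a + pvCnt ((t :: xs).take (i + 1)))
        = (a + (if t ≠ 442 then 1 else 0)) ::
          (List.range xs.length).map
            (fun i => (a + (if t ≠ 442 then 1 else 0)) + pvCnt (xs.take (i + 1))) := by
      rw [List.range_succ_eq_map, List.map_cons, List.map_map]
      congr 1
      · have h0 : (t :: xs).take (0 + 1) = [t] := rfl
        rw [h0, show ([t] : List Int) = t :: [] from rfl, pvCnt_cons,
          show pvCnt ([] : List Int) = 0 from rfl]
        ring
      · apply List.map_congr_left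
        intro i _
        show a + pvCnt ((t :: xs).take (i + 1 + 1)) = _
        have h1 : (t :: xs).take (i + 1 + 1) = t :: xs.take (i + 1) := rfl
        rw [h1, pvCnt_cons]
        ring
    rw [List.length_cons, hmap]
    simp [List.append_assoc]

lemma pvPre_getD (x : List Int) (i : Nat) (hi : i ≤ x.length) :
    (pvPre x).getD i 0 = pvCnt (x.take i) := by
  have h : pvPre x = [] ++ [0] ++ (List.range x.length).map (fun i => 0 + pvCnt (x.take (i + 1))) := by
    simpa [pvPre] using pvPre_fold x [] 0
  rw [h]
  cases i with
  | zero => simp [pvCnt]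
  | succ j =>
    have hj : j < x.length := by omega
    simp [List.getD, hj]

lemma pvB_loop (x : List Int) (xs : List Int) : ∀ (k p : Nat) (out : List Int),
    p ≤ k → x.drop k = xs →
    ((PySem.List.enumerate xs (k : Int)).foldl (pvBStep (pvPre x)) (out, (p : Int))).1
      = out ++ pvRef xs (pvCnt (x.take k) - pvCnt (x.take p)) := by
  induction xs with
  | nil => intro k p out _ _; simp [PySem.List.enumerate, pvRef]
  | cons t xs ih =>
    intro k p out hpk hdrop
    have hk : k < x.length := by
      by_contra h
      have hnil : x.drop k = [] := List.drop_eq_nil_of_le (by omega)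
      rw [hnil] at hdrop
      exact List.cons_ne_nil t xs hdrop.symm
    have hget? : x[k]? = some t := by
      rw [← List.head?_drop, hdrop]; rfl
    have hget : x[k] = t := by
      rwa [List.getElem?_eq_getElem hk, Option.some.injEq] at hget?
    have hdrop' : x.drop (k + 1) = xs := by
      have h' : x.drop (k + 1) = (x.drop k).drop 1 := by
        rw [List.drop_drop]
      rw [h', hdrop]
      rfl
    have htake : x.take (k + 1) = x.take k ++ [t] := by
      rw [List.take_succ]
      simp [List.getElem?_eq_getElem hk, hget]
    have hcnt1 : pvCnt (x.take (k + 1)) = pvCnt (x.take k) + (if t ≠ 442 then 1 else 0) := by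
      rw [htake, pvCnt_append_singleton]
    have hcast : (k : Int) + 1 = ((k + 1 : Nat) : Int) := by push_cast; ring
    have henum : PySem.List.enumerate (t :: xs) (k : Int)
        = ((k : Int), t) :: PySem.List.enumerate xs ((k + 1 : Nat) : Int) := by
      rw [PySem.List.enumerate_cons, hcast]
    have hgk : PySem.List.pyGetD (pvPre x) ((k : Nat) : Int) 0 = pvCnt (x.take k) := by
      rw [PySem.List.pyGetD_natCast]; exact pvPre_getD x k (by omega)
    have hgp : PySem.List.pyGetD (pvPre x) ((p : Nat) : Int) 0 = pvCnt (x.take p) := by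
      rw [PySem.List.pyGetD_natCast]; exact pvPre_getD x p (by omega)
    by_cases h1 : t = 520
    · have hstep : pvBStep (pvPre x) (out, (p : Int)) ((k : Int), t) = (out ++ [-1], (k : Int)) := by
        simp only [pvBStep]; rw [if_pos h1]
      rw [henum, List.foldl_cons, hstep, ih (k + 1) k (out ++ [-1]) (by omega) hdrop']
      have hc : pvCnt (x.take (k + 1)) - pvCnt (x.take k) = 1 := by
        rw [hcnt1]; simp [h1]
      rw [hc]
      simp [pvRef, h1]
    · by_cases h2 : t = 440
      · have hstep : pvBStep (pvPre x) (out, (p : Int)) ((k : Int), t)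
            = (out ++ [PySem.List.pyGetD (pvPre x) ((k : Nat) : Int) 0
                - PySem.List.pyGetD (pvPre x) ((p : Nat) : Int) 0], (k : Int)) := by
          simp only [pvBStep]; rw [if_neg h1, if_pos h2]
        rw [henum, List.foldl_cons, hstep, hgk, hgp,
          ih (k + 1) k (out ++ [pvCnt (x.take k) - pvCnt (x.take p)]) (by omega) hdrop']
        have hc : pvCnt (x.take (k + 1)) - pvCnt (x.take k) = 1 := by
          rw [hcnt1]; simp [h2]
        rw [hc]
        simp [pvRef, h1, h2]
      · have hstep : pvBStep (pvPre x) (out, (p : Int)) ((k : Int), t) = (out, (p : Int)) := by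
          simp only [pvBStep]; rw [if_neg h1, if_neg h2]
        rw [henum, List.foldl_cons, hstep, ih (k + 1) p out (by omega) hdrop']
        by_cases h3 : t = 442
        · have hc : pvCnt (x.take (k + 1)) = pvCnt (x.take k) := by
            rw [hcnt1]; simp [h3]
          rw [hc]
          simp [pvRef, h1, h2, h3]
        · have hc : pvCnt (x.take (k + 1)) = pvCnt (x.take k) + 1 := by
            rw [hcnt1]; simp [h3]
          have hc' : pvCnt (x.take k) + 1 - pvCnt (x.take p)
              = (pvCnt (x.take k) - pvCnt (x.take p)) + 1 := by ring
          rw [hc, hc']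
          simp [pvRef, h1, h2, h3]

-- ===== VERDICT (by name: the statement is the Claim_ definition above) =====
theorem obtain_theme_var_tokens_per_bar_spec : Claim_equal_obtain_theme_var_tokens_per_bar := by
  intro x _
  unfold Spec_obtain_theme_var_tokens_per_bar obtain_theme_var_tokens_per_bar obtain_theme_var_tokens_per_bar_alt
  have hB := pvB_loop x x 0 0 [] (le_refl 0) (by simp)
  simp only [Nat.cast_zero, List.take_zero] at hB
  rw [pvA_fold x [] 0, hB]
  simp [pvCnt]
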